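-- pv_equiv track=rewrite | github.com/orrmatityahu/pyramid | math_utils.py | build_paths
-- ===== SOURCE A (Python) =====
-- def build_paths(rows, current_row=0, start=0):
--     """
--     a recursive function to build all paths in rows
--     :param rows: an array of array that represents rows in pyramid
--     :param current_row: current row  - 0 is default to start from first row
--     :param start: from where to start in the row
--     :return: array of arrays - every array is path in the pyramid
--     """
--     # gets the index and number of each number in the row
--     for i, num in enumerate(rows[current_row]):
--         # Checks if it is within 1 number radius, if not it skips this one.
--         if not (0 <= (i - start) < 2):
--             continue
--         # We are iterating through the last row so simply yield the number as it has no children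
--         if current_row == len(rows) - 1:
--             yield [num]
--         else:
--             # This is not the last row so get all children of this number and yield them
--             for child in build_paths(rows, current_row + 1, i):
--                 yield [num] + child
-- ===== SOURCE B (Python) =====
-- def build_paths(rows, current_row=0, start=0):
--     """Iterative level-by-level frontier expansion (forward DP) instead of recursion.
--
--     Returns the same paths in the same left-first order as the recursive
--     generator: expanding the frontier row by row preserves the lexicographic
--     order of position choices, which is exactly the DFS emission order.
--     """
--     row0 = rows[current_row]
--     frontier = [(i, [row0[i]]) for i in (start, start + 1) if 0 <= i < len(row0)]
--     for r in range(current_row + 1, len(rows)):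
--         row = rows[r]
--         frontier = [(j, path + [row[j]])
--                     for i, path in frontier
--                     for j in (i, i + 1) if 0 <= j < len(row)]
--     return [path for _, path in frontier]
-- ===== Notes on version B (the rewrite author's own statement) =====
-- stated objective: alternative
-- what changed: Replaced the recursive DFS generator by an iterative level-by-level frontier expansion (forward DP over rows) that produces the same paths in the same left-first order.
import Mathlib
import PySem

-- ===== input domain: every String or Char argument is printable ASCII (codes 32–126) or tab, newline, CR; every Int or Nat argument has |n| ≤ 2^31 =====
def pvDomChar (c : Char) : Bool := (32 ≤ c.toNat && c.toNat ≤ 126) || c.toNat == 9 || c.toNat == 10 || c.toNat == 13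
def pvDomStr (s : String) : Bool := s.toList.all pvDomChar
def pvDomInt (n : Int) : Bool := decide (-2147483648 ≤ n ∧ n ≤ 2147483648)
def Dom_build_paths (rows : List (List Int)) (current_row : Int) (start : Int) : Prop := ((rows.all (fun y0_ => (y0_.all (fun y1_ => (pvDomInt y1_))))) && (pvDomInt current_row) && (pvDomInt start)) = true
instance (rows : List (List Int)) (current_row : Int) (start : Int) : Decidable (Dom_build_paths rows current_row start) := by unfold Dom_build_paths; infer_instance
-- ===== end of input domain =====

-- B replaces A's recursive DFS generator by an iterative level-by-level frontier
-- expansion (forward DP); same paths in the same order ("alternative" objective).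

-- ===== PORT A =====
-- Literal port of the recursive generator: for (i, num) in enumerate(rows[current_row]),
-- skip unless 0 <= i - start < 2; yield [num] on the last row, else prepend num to each child path.
def build_paths (rows : List (List Int)) (current_row : Int) (start : Int) : List (List Int) :=
  match h : PySem.List.pyGet? rows current_row with
  | none => []   -- Python raises IndexError here; excluded by Pre_build_paths
  | some row =>
    (PySem.List.enumerate row 0).flatMap (fun q =>
      if 0 ≤ q.1 - start ∧ q.1 - start < 2 then
        if current_row = (rows.length : Int) - 1 then [[q.2]]
        else (build_paths rows (current_row + 1) q.1).map (fun child => q.2 :: child)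
      else [])
termination_by ((rows.length : Int) - current_row).toNat
decreasing_by
  have hin : ¬ PySem.List.pyGet? rows current_row = none := by simp [h]
  rw [PySem.List.pyGet?_eq_none_iff] at hin
  simp only [not_not, PySem.Raise.InRange] at hin
  omega

-- ===== PORT B =====
-- one loop step of Source B: expand every frontier entry with its (at most two) children in row rows[r]
def pvStep (rows : List (List Int)) (fr : List (Int × List Int)) (r : Int) : List (Int × List Int) :=
  let row := PySem.List.pyGetD rows r []
  fr.flatMap (fun p => [p.1, p.1 + 1].flatMap (fun j =>
    if 0 ≤ j ∧ j < (row.length : Int) then [(j, p.2 ++ [PySem.List.pyGetD row j 0])] else []))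

def build_paths_alt (rows : List (List Int)) (current_row : Int) (start : Int) : List (List Int) :=
  match PySem.List.pyGet? rows current_row with
  | none => []   -- Source B also raises IndexError on rows[current_row]; excluded by Pre_build_paths
  | some row0 =>
    let init := [start, start + 1].flatMap (fun i =>
      if 0 ≤ i ∧ i < (row0.length : Int) then [(i, [PySem.List.pyGetD row0 i 0])] else [])
    (((PySem.List.pyRange (current_row + 1) (rows.length : Int) 1).foldl (pvStep rows) init).map Prod.snd)

-- ===== PRECONDITION & SPEC =====
-- Pre_ excludes exactly the inputs on which A raises IndexError on rows[current_row]
-- (empty rows, or current_row outside Python's index range); A returns on every other input.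
def Pre_build_paths (rows : List (List Int)) (current_row : Int) (start : Int) : Prop :=
  PySem.Raise.InRange rows.length current_row
instance (rows : List (List Int)) (current_row : Int) (start : Int) : Decidable (Pre_build_paths rows current_row start) := by unfold Pre_build_paths; infer_instance

def pvWitness_build_paths : List (List Int) × Int × Int := ([[1], [2, 3]], 0, 0)

def Spec_build_paths (rows : List (List Int)) (current_row : Int) (start : Int) (out : List (List Int)) : Prop := out = build_paths_alt rows current_row start
instance (rows : List (List Int)) (current_row : Int) (start : Int) (out : List (List Int)) : Decidable (Spec_build_paths rows current_row start out) := by unfold Spec_build_paths; infer_instance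

-- ===== CLAIM (what is proved, stated in full; the proofs are below) =====
def Claim_equal_build_paths : Prop := ∀ (rows : List (List Int)) (current_row : Int) (start : Int), Dom_build_paths rows current_row start → Pre_build_paths rows current_row start → Spec_build_paths rows current_row start (build_paths rows current_row start)

-- ===== LEMMAS AND PROOFS =====

-- pyGetD on a cons at a positive index steps into the tail
lemma pvGetD_cons_shift (a : Int) (l : List Int) (i : Int) (d : Int) (h1 : 1 ≤ i) :
    PySem.List.pyGetD (a :: l) i d = PySem.List.pyGetD l (i - 1) d := by
  rw [PySem.List.pyGetD, PySem.List.pyGetD,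
      PySem.List.pyGet?_of_nonneg (a :: l) (by omega),
      PySem.List.pyGet?_of_nonneg l (by omega)]
  have hi : i.toNat = (i - 1).toNat + 1 := by omega
  rw [hi, List.getElem?_cons_succ]

-- pyGet? = some and pyGetD agree
lemma pvGetD_of_pyGet?_some {α : Type} (xs : List α) (i : Int) (d x : α)
    (h : PySem.List.pyGet? xs i = some x) : PySem.List.pyGetD xs i d = x := by
  rw [PySem.List.pyGetD, h]
  rfl

lemma pvFlatMap_single {α β : Type} (l : List α) (f : α → β) :
    l.flatMap (fun x => [f x]) = l.map f := by
  induction l <;> simp_all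

lemma pvGet?_some_of_inRange {α : Type} (xs : List α) (i : Int)
    (h : PySem.Raise.InRange xs.length i) : ∃ x, PySem.List.pyGet? xs i = some x := by
  cases h' : PySem.List.pyGet? xs i with
  | none => exact absurd ((PySem.List.pyGet?_eq_none_iff xs i).mp h') (not_not_intro h)
  | some x => exact ⟨x, rfl⟩

-- the window 0 <= i - s < 2 over enumerate selects exactly positions s and s+1
lemma pvSelect (F : Int → Int → List (List Int)) :
    ∀ (row : List Int) (k s : Int),
    (PySem.List.enumerate row k).flatMap (fun q =>
        if 0 ≤ q.1 - s ∧ q.1 - s < 2 then F q.1 q.2 else [])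
    = [s, s + 1].flatMap (fun j =>
        if k ≤ j ∧ j < k + (row.length : Int) then F j (PySem.List.pyGetD row (j - k) 0) else []) := by
  intro row
  induction row with
  | nil =>
    intro k s
    simp only [PySem.List.enumerate_nil, List.flatMap_nil, List.flatMap_cons,
      List.length_nil, Nat.cast_zero, List.append_nil]
    rw [if_neg (by omega), if_neg (by omega)]
    simp
  | cons a l ih =>
    intro k s
    rw [PySem.List.enumerate_cons, List.flatMap_cons, ih (k + 1) s]
    clear ih
    simp only [List.flatMap_cons, List.flatMap_nil, List.append_nil, List.length_cons]
    push_cast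
    by_cases hk : k = s
    · subst hk
      rw [show k - k = (0 : Int) from by omega, PySem.List.pyGetD_zero_cons,
        pvGetD_cons_shift a l (k + 1 - k) 0 (by omega),
        show k + 1 - k - 1 = k + 1 - (k + 1) from by omega]
      by_cases hlen : 0 < (l.length : Int)
      · rw [if_pos (by omega), if_neg (by omega), if_pos (by omega), if_pos (by omega),
          if_pos (by omega)]
        simp
      · rw [if_pos (by omega), if_neg (by omega), if_neg (by omega), if_pos (by omega),
          if_neg (by omega)]
        simp
    · by_cases hk1 : k = s + 1
      · subst hk1
        rw [show s + 1 - (s + 1) = (0 : Int) from by omega, PySem.List.pyGetD_zero_cons,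
          if_pos (by omega), if_neg (by omega), if_neg (by omega), if_neg (by omega),
          if_pos (by omega)]
        simp
      · by_cases hks : k + 1 ≤ s
        · rw [pvGetD_cons_shift a l (s - k) 0 (by omega),
            show s - k - 1 = s - (k + 1) from by omega,
            pvGetD_cons_shift a l (s + 1 - k) 0 (by omega),
            show s + 1 - k - 1 = s + 1 - (k + 1) from by omega,
            if_neg (by omega)]
          split_ifs <;> first | omega | simp
        · rw [if_neg (by omega), if_neg (by omega), if_neg (by omega),
            if_neg (by omega), if_neg (by omega)]
          simp

-- loop invariant for B's frontier fold, phrased against A's recursion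
lemma pvInv (rows : List (List Int)) :
    ∀ (k : Nat) (r : Int) (fr : List (Int × List Int)),
    r = (rows.length : Int) - 1 - k →
    -(rows.length : Int) ≤ r → r < (rows.length : Int) →
    ((PySem.List.pyRange (r + 1) (rows.length : Int) 1).foldl (pvStep rows) fr).map Prod.snd
      = fr.flatMap (fun p =>
          if r = (rows.length : Int) - 1 then [p.2]
          else (build_paths rows (r + 1) p.1).map (fun c => p.2 ++ c)) := by
  intro k
  induction k with
  | zero =>
    intro r fr hr hlo hhi
    have hr' : r = (rows.length : Int) - 1 := by push_cast at hr; omega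
    subst hr'
    rw [PySem.List.pyRange_one_eq_nil (by omega)]
    simp [pvFlatMap_single]
  | succ m ih =>
    intro r fr hr hlo hhi
    have hlt : r < (rows.length : Int) - 1 := by push_cast at hr; omega
    rw [PySem.List.pyRange_one_cons (by omega), List.foldl_cons,
      ih (r + 1) (pvStep rows fr (r + 1)) (by push_cast at hr ⊢; omega) (by omega) (by omega)]
    simp only [if_neg (show ¬ r = (rows.length : Int) - 1 from by omega)]
    rw [pvStep]
    simp only [List.flatMap_assoc]
    congr 1
    funext p
    -- per-entry goal: expanding p's two children then continuing equals A's recursion at row r+1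
    obtain ⟨row', hrow'⟩ := pvGet?_some_of_inRange rows (r + 1)
      (by simp only [PySem.Raise.InRange]; omega)
    have hgd : PySem.List.pyGetD rows (r + 1) [] = row' :=
      pvGetD_of_pyGet?_some rows (r + 1) [] row' hrow'
    rw [build_paths.eq_def, hrow']
    simp only [hgd]
    rw [pvSelect (fun j num => if r + 1 = (rows.length : Int) - 1 then [[num]]
        else (build_paths rows (r + 1 + 1) j).map (fun child => num :: child)) row' 0 p.1]
    simp only [List.flatMap_cons, List.flatMap_nil, List.append_nil, zero_add, sub_zero,
      List.map_append]
    by_cases hlast : r + 1 = (rows.length : Int) - 1 <;>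
      split_ifs <;> simp_all [List.map_map, Function.comp_def]

-- ===== VERDICT (by name: the statement is the Claim_ definition above) =====
theorem build_paths_spec : Claim_equal_build_paths := by
  intro rows current_row start hDom hPre
  unfold Spec_build_paths
  have hPre' : PySem.Raise.InRange rows.length current_row := hPre
  have hbounds : -(rows.length : Int) ≤ current_row ∧ current_row < (rows.length : Int) := by
    simpa [PySem.Raise.InRange] using hPre'
  obtain ⟨row0, h0⟩ := pvGet?_some_of_inRange rows current_row hPre'
  rw [build_paths.eq_def, build_paths_alt, h0]
  simp only []
  rw [pvInv rows ((rows.length : Int) - 1 - current_row).toNat current_row _ (by omega)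
    (by omega) (by omega)]
  rw [pvSelect (fun j num => if current_row = (rows.length : Int) - 1 then [[num]]
      else (build_paths rows (current_row + 1) j).map (fun child => num :: child)) row0 0 start]
  simp only [List.flatMap_cons, List.flatMap_nil, List.append_nil, zero_add, sub_zero,
    List.flatMap_append]
  split_ifs <;> simp
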